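-- pv_equiv track=rewrite | github.com/ko9ma7/BTXGH | instagramEDA/feature.py | user_comment
-- ===== SOURCE A (Python) =====
-- from collections import Counter, OrderedDict
--
-- def user_comment(json_file):
--     total_comment = []
--     for post in json_file:
--         if post.get('comments'):
--             for comment in post.get('comments'):
--                 total_comment.append(comment.get('author'))
--     value = Counter(total_comment)
--     comm1 = len({k : v for k,v in value.items() if v==1}) # 총 댓글 5개 이상인 유저
--     comm2 = len({k : v for k,v in value.items() if v==2})
--     comm3 = len({k : v for k,v in value.items() if v==3})
--     comm4 = len({k : v for k,v in value.items() if v==4})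
--     comm5 = len({k : v for k,v in value.items() if v==5})
--     comm6 = len({k : v for k,v in value.items() if v==6})
--     comm7 = len({k : v for k,v in value.items() if v==7})
--     comm8 = len({k : v for k,v in value.items() if v==8})
--     comm9 = len({k : v for k,v in value.items() if v==9})
--     comm10 = len({k : v for k,v in value.items() if v==10})
--     comm_over_10 = len({k : v for k,v in value.items() if v>10})
--
--     user_by_comment = {'comment1': comm1, 'comment2': comm2, 'comment3': comm3,
--                     'comment4': comm4, 'comment5': comm5,
--                     'comment6': comm6, 'comment7': comm7,
--                     'comment8': comm8, 'comment9': comm9,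
--                     'comment10': comm10, 'comment_over_10': comm_over_10
--                     }
--
--     return user_by_comment
-- ===== SOURCE B (Python) =====
-- def user_comment(json_file):
--     # No counting table at all: flatten the authors, then repeatedly take the
--     # first remaining author, count its occurrences by scanning, bump the
--     # matching bucket, and drop all its occurrences before continuing.
--     flat = [c.get('author') for post in json_file if post.get('comments')
--             for c in post.get('comments')]
--     buckets = [0] * 12
--     while flat:
--         a = flat[0]
--         buckets[min(flat.count(a), 11)] += 1
--         flat = [x for x in flat if x != a]
--     return {'comment1': buckets[1], 'comment2': buckets[2], 'comment3': buckets[3],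
--             'comment4': buckets[4], 'comment5': buckets[5], 'comment6': buckets[6],
--             'comment7': buckets[7], 'comment8': buckets[8], 'comment9': buckets[9],
--             'comment10': buckets[10], 'comment_over_10': buckets[11]}
-- ===== Notes on version B (the rewrite author's own statement) =====
-- stated objective: alternative
-- what changed: B builds no Counter and no per-bucket dict comprehensions at all: it flattens the authors once, then repeatedly takes the first remaining author, counts its occurrences by a direct scan, increments the single matching bucket (capped at 11) in a 12-slot array, and filters those occurrences out before continuing.
import Mathlib
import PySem

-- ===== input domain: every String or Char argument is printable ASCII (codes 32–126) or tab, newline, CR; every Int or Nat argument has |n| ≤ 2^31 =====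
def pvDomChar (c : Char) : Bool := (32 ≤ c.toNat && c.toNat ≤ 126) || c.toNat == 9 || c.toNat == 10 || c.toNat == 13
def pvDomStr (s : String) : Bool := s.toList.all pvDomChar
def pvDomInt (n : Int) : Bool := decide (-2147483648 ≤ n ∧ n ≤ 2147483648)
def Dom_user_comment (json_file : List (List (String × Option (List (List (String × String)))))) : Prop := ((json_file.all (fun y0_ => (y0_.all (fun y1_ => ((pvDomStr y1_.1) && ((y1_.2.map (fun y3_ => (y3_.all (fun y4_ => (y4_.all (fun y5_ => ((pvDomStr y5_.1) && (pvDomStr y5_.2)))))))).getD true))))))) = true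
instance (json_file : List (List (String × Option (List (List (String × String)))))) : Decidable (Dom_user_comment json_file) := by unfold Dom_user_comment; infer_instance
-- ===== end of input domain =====

-- B drops A's Counter and its 11 dict-comprehension scans entirely: it repeatedly takes the
-- first remaining author, counts it by a scan, bumps one bucket and removes its occurrences;
-- objective: alternative (no counting table; trades hashing for repeated scans).

-- ===== PORT A =====
-- comment.get('author') (shared: both Pythons read the author this way)
def pyAuthor (comment : List (String × String)) : Option String :=
  (PySem.Dict.mk comment).get? "author"

-- post.get('comments') (shared by both Pythons)
def pyGetComments (post : List (String × Option (List (List (String × String))))) :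
    Option (Option (List (List (String × String)))) :=
  (PySem.Dict.mk post).get? "comments"

-- body of A's collection loop: append each comment's author to total_comment
def aCollect (acc : List (Option String))
    (post : List (String × Option (List (List (String × String))))) : List (Option String) :=
  match pyGetComments post with
  | some (some (c :: cs)) =>
      (c :: cs).foldl (fun acc comment => acc ++ [pyAuthor comment]) acc
  | _ => acc

def user_comment (json_file : List (List (String × Option (List (List (String × String)))))) : List (String × Int) :=
  let total_comment : List (Option String) := json_file.foldl aCollect []
  let value := PySem.Dict.counter total_comment
  -- len({k : v for k,v in value.items() if <p>(k,v)})
  let comp : ((Option String) × Int → Bool) → Int := fun p =>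
    ((value.items.foldl (fun d q => if p q then d.insert q.1 q.2 else d)
        (PySem.Dict.empty : PySem.Dict (Option String) Int)).size : Int)
  let comm1 := comp (fun q => q.2 == 1)
  let comm2 := comp (fun q => q.2 == 2)
  let comm3 := comp (fun q => q.2 == 3)
  let comm4 := comp (fun q => q.2 == 4)
  let comm5 := comp (fun q => q.2 == 5)
  let comm6 := comp (fun q => q.2 == 6)
  let comm7 := comp (fun q => q.2 == 7)
  let comm8 := comp (fun q => q.2 == 8)
  let comm9 := comp (fun q => q.2 == 9)
  let comm10 := comp (fun q => q.2 == 10)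
  let comm_over_10 := comp (fun q => decide ((10:Int) < q.2))
  [("comment1", comm1), ("comment2", comm2), ("comment3", comm3),
   ("comment4", comm4), ("comment5", comm5), ("comment6", comm6),
   ("comment7", comm7), ("comment8", comm8), ("comment9", comm9),
   ("comment10", comm10), ("comment_over_10", comm_over_10)]

-- ===== PORT B =====
-- B's while loop: take the first remaining author, count it, bump that bucket,
-- drop all its occurrences, repeat until the list is empty
def bGo (flat : List (Option String)) (buckets : List Int) : List Int :=
  match flat with
  | [] => buckets
  | a :: rest =>
      let j := min (PySem.List.count (a :: rest) a) 11
      bGo ((a :: rest).filter (fun x => !(x == a)))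
        (PySem.List.pySetD buckets j (PySem.List.pyGetD buckets j 0 + 1))
termination_by flat.length
decreasing_by
  simp only [List.filter_cons, beq_self_eq_true, Bool.not_true, List.length_cons]
  exact Nat.lt_succ_of_le (List.length_filter_le _ _)

def user_comment_alt (json_file : List (List (String × Option (List (List (String × String)))))) : List (String × Int) :=
  -- flat = [c.get('author') for post in json_file if post.get('comments') for c in post.get('comments')]
  let flat : List (Option String) := json_file.flatMap (fun post =>
    match pyGetComments post with
    | some (some (c :: cs)) => (c :: cs).map pyAuthor
    | _ => [])
  let buckets := bGo flat (List.replicate 12 0)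
  [("comment1", PySem.List.pyGetD buckets 1 0), ("comment2", PySem.List.pyGetD buckets 2 0),
   ("comment3", PySem.List.pyGetD buckets 3 0), ("comment4", PySem.List.pyGetD buckets 4 0),
   ("comment5", PySem.List.pyGetD buckets 5 0), ("comment6", PySem.List.pyGetD buckets 6 0),
   ("comment7", PySem.List.pyGetD buckets 7 0), ("comment8", PySem.List.pyGetD buckets 8 0),
   ("comment9", PySem.List.pyGetD buckets 9 0), ("comment10", PySem.List.pyGetD buckets 10 0),
   ("comment_over_10", PySem.List.pyGetD buckets 11 0)]

-- ===== PRECONDITION & SPEC =====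
def Spec_user_comment (json_file : List (List (String × Option (List (List (String × String)))))) (out : List (String × Int)) : Prop := out = user_comment_alt json_file
instance (json_file : List (List (String × Option (List (List (String × String)))))) (out : List (String × Int)) : Decidable (Spec_user_comment json_file out) := by unfold Spec_user_comment; infer_instance

-- ===== CLAIM (what is proved, stated in full; the proofs are below) =====
def Claim_equal_user_comment : Prop := ∀ (json_file : List (List (String × Option (List (List (String × String)))))), Dom_user_comment json_file → Spec_user_comment json_file (user_comment json_file)

-- ===== LEMMAS AND PROOFS =====

-- the authors contributed by one post (empty for a missing/None/empty comments entry)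
def pyAuthors (post : List (String × Option (List (List (String × String))))) : List (Option String) :=
  match pyGetComments post with
  | some (some (c :: cs)) => (c :: cs).map pyAuthor
  | _ => []

lemma aCollect_eq (acc : List (Option String)) (post : List (String × Option (List (List (String × String))))) :
    aCollect acc post = acc ++ pyAuthors post := by
  unfold aCollect pyAuthors
  rcases pyGetComments post with _ | (_ | (_ | ⟨c, cs⟩))
  · simp
  · simp
  · simp
  · exact PySem.List.foldl_append_singleton_eq_map pyAuthor (c :: cs) acc

lemma total_comment_eq (posts : List (List (String × Option (List (List (String × String))))))
    (acc : List (Option String)) :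
    posts.foldl aCollect acc = acc ++ posts.flatMap pyAuthors := by
  induction posts generalizing acc with
  | nil => simp
  | cons p ps ih => simp [List.foldl_cons, aCollect_eq, ih, List.flatMap_cons, List.append_assoc]

-- size of A's dict comprehension over the items of a nodup-key dict = countP
lemma compSize (items : List (Option String × Int)) (p : Option String × Int → Bool)
    (h : (items.map Prod.fst).Nodup) :
    ((items.foldl (fun d q => if p q then d.insert q.1 q.2 else d)
        (PySem.Dict.empty : PySem.Dict (Option String) Int)).size : Int)
      = (List.countP p items : Nat) := by
  rw [← List.foldl_filter]
  have hnd : ((items.filter p).map Prod.fst).Nodup :=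
    List.Nodup.sublist (List.Sublist.map Prod.fst List.filter_sublist) h
  rw [PySem.Dict.size,
    PySem.Dict.items_foldl_insert_fresh (items.filter p) Prod.fst Prod.snd
      (PySem.Dict.empty : PySem.Dict (Option String) Int)
      (fun a _ => PySem.Dict.contains_empty a.1) hnd]
  simp [PySem.Dict.empty, List.countP_eq_length_filter]

-- A's bucket p = countP over the distinct authors, via items_counter
lemma compCounter (flat : List (Option String)) (p : Option String × Int → Bool) :
    (((PySem.Dict.counter flat).items.foldl (fun d q => if p q then d.insert q.1 q.2 else d)
        (PySem.Dict.empty : PySem.Dict (Option String) Int)).size : Int)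
      = (List.countP (fun a => p (a, (flat.count a : Int))) (PySem.Set.ofList flat) : Nat) := by
  have hnd : ((PySem.Dict.counter flat).items.map Prod.fst).Nodup := by
    simpa [PySem.Dict.keys] using PySem.Dict.nodup_keys_counter flat
  rw [compSize _ _ hnd, PySem.Dict.items_counter, List.countP_map]
  rfl

-- folding Set.add over elements all ≠ a commutes with a cons'd accumulator head
lemma foldl_add_cons (a : Option String) (s : List (Option String)) (l : List (Option String))
    (h : ∀ x ∈ l, x ≠ a) :
    List.foldl PySem.Set.add (a :: s) l = a :: List.foldl PySem.Set.add s l := by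
  induction l generalizing s with
  | nil => rfl
  | cons x xs ih =>
      have hx : x ≠ a := h x (by simp)
      have : PySem.Set.add (a :: s) x = a :: PySem.Set.add s x := by
        simp [PySem.Set.add, PySem.Set.contains, hx]; split <;> rfl
      rw [List.foldl_cons, List.foldl_cons, this, ih _ (fun y hy => h y (by simp [hy]))]

-- adding an element already in the accumulator is a no-op, so a's copies can be filtered out
lemma foldl_add_filter (s l : List (Option String)) (a : Option String) (ha : a ∈ s) :
    List.foldl PySem.Set.add s (l.filter (fun x => !(x == a))) = List.foldl PySem.Set.add s l := by
  induction l generalizing s with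
  | nil => rfl
  | cons x xs ih =>
      by_cases hx : x = a
      · subst hx
        have : PySem.Set.add s x = s := by
          simp [PySem.Set.add, PySem.Set.contains, ha]
        simp [this, ih s ha]
      · have hmem : a ∈ PySem.Set.add s x := by
          simp [PySem.Set.add]; split <;> simp [ha]
        simp [(by simpa using (bne_iff_ne (a := x) (b := a)).2 hx : (!(x == a)) = true),
          ih _ hmem]

-- first-occurrence dedup of a::l = a followed by the dedup of l without a's copies
lemma ofList_cons_filter (a : Option String) (l : List (Option String)) :
    PySem.Set.ofList (a :: l) = a :: PySem.Set.ofList (l.filter (fun x => !(x == a))) := by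
  have h1 : PySem.Set.ofList (a :: l) = List.foldl PySem.Set.add [a] l := by
    rw [PySem.Set.ofList_eq_foldl]; rfl
  have h2 : List.foldl PySem.Set.add [a] l = List.foldl PySem.Set.add [a] (l.filter (fun x => !(x == a))) :=
    (foldl_add_filter [a] l a (by simp)).symm
  rw [h1, h2, foldl_add_cons a [] _ (fun x hx => by
    have := List.of_mem_filter hx
    simpa using this), PySem.Set.ofList_eq_foldl]

-- the per-distinct-author bucket totals that bGo accumulates
def dcount (flat : List (Option String)) (k : Nat) : Nat :=
  List.countP (fun a => min (flat.count a) 11 == k) (PySem.Set.ofList flat)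

-- splitting the per-distinct tally at the head author
lemma dcount_cons (a : Option String) (rest : List (Option String)) (k : Nat) :
    dcount (a :: rest) k
      = dcount (rest.filter (fun x => !(x == a))) k
          + (if min ((a :: rest).count a) 11 = k then 1 else 0) := by
  unfold dcount
  rw [ofList_cons_filter, List.countP_cons]
  have hcongr : ∀ b ∈ PySem.Set.ofList (rest.filter (fun x => !(x == a))),
      (min ((a :: rest).count b) 11 == k)
        = (min ((rest.filter (fun y => !(y == a))).count b) 11 == k) := by
    intro b hb
    have hbmem : b ∈ rest.filter (fun x => !(x == a)) := by
      simpa using (PySem.Set.mem_ofList (rest.filter (fun x => !(x == a))) b).1 hb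
    have hbne : b ≠ a := by simpa using (List.of_mem_filter hbmem)
    have h1 : (a :: rest).count b = rest.count b := by
      simp [hbne.symm]
    have h2 : (rest.filter (fun y => !(y == a))).count b = rest.count b :=
      List.count_filter (by simpa using hbne)
    simp only [h1, h2]
  rw [List.countP_congr (fun b hb => by rw [hcongr b hb])]
  simp only [beq_iff_eq]

lemma bGo_getD_aux (n : Nat) : ∀ (flat : List (Option String)), flat.length ≤ n →
    ∀ (buckets : List Int), buckets.length = 12 → ∀ (k : Nat), k < 12 →
    PySem.List.pyGetD (bGo flat buckets) (k : Int) 0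
      = PySem.List.pyGetD buckets (k : Int) 0 + (dcount flat k : Int) := by
  induction n with
  | zero =>
      intro flat hf buckets _ k _
      have : flat = [] := List.eq_nil_of_length_eq_zero (Nat.le_zero.mp hf)
      subst this
      simp [bGo, dcount, PySem.Set.ofList]
  | succ n ih =>
      intro flat hf buckets hb k hk
      match flat with
      | [] => simp [bGo, dcount, PySem.Set.ofList]
      | a :: rest =>
          rw [bGo]
          have hj1 : 1 ≤ PySem.List.count (a :: rest) a := by
            rw [PySem.List.count_eq]
            simp
          have hj : min (PySem.List.count (a :: rest) a) 11 < 12 :=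
            Nat.lt_succ_of_le (Nat.min_le_right _ _)
          have hfil : (a :: rest).filter (fun x => !(x == a)) = rest.filter (fun x => !(x == a)) := by
            simp
          have hrest : ((a :: rest).filter (fun x => !(x == a))).length ≤ n := by
            rw [hfil]
            exact le_trans (List.length_filter_le _ _) (Nat.le_of_succ_le_succ hf)
          have hlen' : (PySem.List.pySetD buckets
              ((min (PySem.List.count (a :: rest) a) 11 : Nat) : Int)
              (PySem.List.pyGetD buckets ((min (PySem.List.count (a :: rest) a) 11 : Nat) : Int) 0 + 1)).length = 12 := by
            rw [PySem.List.pySetD_natCast]; simpa using hb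
          rw [ih _ hrest _ hlen' k hk,
            PySem.List.pyGetD_pySetD_natCast buckets _ k _ 0 (by omega)]
          rw [hfil, dcount_cons a rest k, PySem.List.count_eq]
          push_cast
          split_ifs with h1 h2 h2
          · rw [← h2]; push_cast; ring
          · exact absurd h1 (by simpa using (Ne.symm h2))
          · exact absurd h2.symm h1
          · ring

-- pyGetD on the initial all-zero bucket list
lemma pyGetD_replicate (k : Nat) (hk : k < 12) :
    PySem.List.pyGetD (List.replicate 12 (0 : Int)) (k : Int) 0 = 0 := by
  rw [PySem.List.pyGetD_natCast]
  interval_cases k <;> rfl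

-- B's bucket k (1 ≤ k ≤ 10) = A's comprehension size for count == k
lemma bucketEq (flat : List (Option String)) (k : Nat) (h1 : 1 ≤ k) (h2 : k ≤ 10) :
    (((PySem.Dict.counter flat).items.foldl
        (fun d q => if q.2 == (k : Int) then d.insert q.1 q.2 else d)
        (PySem.Dict.empty : PySem.Dict (Option String) Int)).size : Int)
      = PySem.List.pyGetD (bGo flat (List.replicate 12 0)) (k : Int) 0 := by
  rw [compCounter, bGo_getD_aux flat.length flat le_rfl _ (by simp) k (by omega),
    pyGetD_replicate k (by omega), zero_add]
  unfold dcount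
  congr 1
  refine congrArg Nat.cast (List.countP_congr (fun b _ => ?_))
  simp only [beq_iff_eq]
  omega

-- B's bucket 11 = A's comprehension size for count > 10
lemma bucketEqOver (flat : List (Option String)) :
    (((PySem.Dict.counter flat).items.foldl
        (fun d q => if decide ((10:Int) < q.2) then d.insert q.1 q.2 else d)
        (PySem.Dict.empty : PySem.Dict (Option String) Int)).size : Int)
      = PySem.List.pyGetD (bGo flat (List.replicate 12 0)) ((11 : Nat) : Int) 0 := by
  rw [compCounter, bGo_getD_aux flat.length flat le_rfl _ (by simp) 11 (by omega),
    pyGetD_replicate 11 (by omega), zero_add]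
  unfold dcount
  congr 1
  refine congrArg Nat.cast (List.countP_congr (fun b _ => ?_))
  simp only [beq_iff_eq, decide_eq_true_eq]
  omega

-- ===== VERDICT (by name: the statement is the Claim_ definition above) =====
set_option maxHeartbeats 1000000 in
theorem user_comment_spec : Claim_equal_user_comment := by
  intro json_file _
  unfold Spec_user_comment user_comment user_comment_alt
  simp only [total_comment_eq, List.nil_append]
  have hfl : (json_file.flatMap (fun post =>
      match pyGetComments post with
      | some (some (c :: cs)) => (c :: cs).map pyAuthor
      | _ => [])) = json_file.flatMap pyAuthors := rfl
  rw [hfl]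
  refine congrArg₂ _ ?_ (congrArg₂ _ ?_ (congrArg₂ _ ?_ (congrArg₂ _ ?_ (congrArg₂ _ ?_
    (congrArg₂ _ ?_ (congrArg₂ _ ?_ (congrArg₂ _ ?_ (congrArg₂ _ ?_ (congrArg₂ _ ?_
    (congrArg₂ _ ?_ rfl))))))))))
  · exact congrArg _ (bucketEq _ 1 (by norm_num) (by norm_num))
  · exact congrArg _ (bucketEq _ 2 (by norm_num) (by norm_num))
  · exact congrArg _ (bucketEq _ 3 (by norm_num) (by norm_num))
  · exact congrArg _ (bucketEq _ 4 (by norm_num) (by norm_num))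
  · exact congrArg _ (bucketEq _ 5 (by norm_num) (by norm_num))
  · exact congrArg _ (bucketEq _ 6 (by norm_num) (by norm_num))
  · exact congrArg _ (bucketEq _ 7 (by norm_num) (by norm_num))
  · exact congrArg _ (bucketEq _ 8 (by norm_num) (by norm_num))
  · exact congrArg _ (bucketEq _ 9 (by norm_num) (by norm_num))
  · exact congrArg _ (bucketEq _ 10 (by norm_num) (by norm_num))
  · exact congrArg _ (bucketEqOver _)
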